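-- pv_equiv track=rewrite | github.com/norbix14/python-unsam | Notas/Ejercicios/ejercicios_python/Clase06/repaso.py | propagar_al_vecino
-- ===== SOURCE A (Python) =====
-- def propagar_al_vecino(lista):
--   modificado = False
--   n = len(lista)
--   for i, e in enumerate(lista):
--     if (e == 1) and (i < n - 1) and (lista[i + 1] == 0):
--       lista[i + 1] = 1
--       modificado = True
--     if (e == 1) and (i > 0) and (lista[i - 1] == 0):
--       lista[i - 1] = 1
--       modificado = True
--   return modificado
-- ===== SOURCE B (Python) =====
-- def propagar_al_vecino(lista):
--     # Note: A mutates lista in place; B does not. Equivalence is about the return value only.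
--     return any((x == 1 and y == 0) or (x == 0 and y == 1)
--                for x, y in zip(lista, lista[1:]))
-- ===== Notes on version B (the rewrite author's own statement) =====
-- stated objective: simpler
-- what changed: Replaced the in-place cascading mutation loop by a single non-mutating scan over adjacent pairs of the original list: the loop reports a modification exactly when some adjacent pair consists of a one next to a zero, so B just tests that existence (A mutates its argument, B does not; the claim is about the return value).
import Mathlib
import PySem

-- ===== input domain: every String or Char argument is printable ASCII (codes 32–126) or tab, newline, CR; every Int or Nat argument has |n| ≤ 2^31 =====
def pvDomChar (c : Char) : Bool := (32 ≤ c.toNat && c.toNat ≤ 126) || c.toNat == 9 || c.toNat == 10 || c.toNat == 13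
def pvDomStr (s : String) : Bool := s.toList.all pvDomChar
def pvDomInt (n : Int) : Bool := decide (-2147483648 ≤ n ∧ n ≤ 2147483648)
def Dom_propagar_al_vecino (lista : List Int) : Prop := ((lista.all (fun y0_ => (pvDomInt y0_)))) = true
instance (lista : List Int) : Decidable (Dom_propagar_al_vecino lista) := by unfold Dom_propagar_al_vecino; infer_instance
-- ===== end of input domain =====

-- B replaces A's in-place cascading-mutation loop by a non-mutating scan of adjacent pairs of the
-- original list (simpler). A mutates `lista` in place, B does not; the equivalence proved here is
-- about the return value only.

-- ===== PORT A =====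
-- one iteration of A's for-loop body, as its two ifs in order; N is the fixed len(lista),
-- state is (current list, modificado), e = lista[i] read at the start of the iteration.
-- list indexing uses List.getD: every index read (i, i+1 with i < N-1, i-1 with 0 < i) is in range,
-- where it agrees with Python's lista[...]
def pvStepA1 (N : Nat) (st : List Int × Bool) (i : Nat) : List Int × Bool :=
  if st.1.getD i 0 == 1 && decide (i < N - 1) && st.1.getD (i + 1) 0 == 0
  then (st.1.set (i + 1) 1, true) else st

def pvStepA2 (e : Int) (st : List Int × Bool) (i : Nat) : List Int × Bool :=
  if e == 1 && decide (0 < i) && st.1.getD (i - 1) 0 == 0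
  then (st.1.set (i - 1) 1, true) else st

def pvStepA (N : Nat) (st : List Int × Bool) (i : Nat) : List Int × Bool :=
  pvStepA2 (st.1.getD i 0) (pvStepA1 N st i) i

def propagar_al_vecino (lista : List Int) : Bool :=
  ((List.range lista.length).foldl (pvStepA lista.length) (lista, false)).2

-- ===== PORT B =====
def propagar_al_vecino_alt (lista : List Int) : Bool :=
  (lista.zip lista.tail).any (fun p => (p.1 == 1 && p.2 == 0) || (p.1 == 0 && p.2 == 1))

-- ===== PRECONDITION & SPEC =====
def Spec_propagar_al_vecino (lista : List Int) (out : Bool) : Prop := out = propagar_al_vecino_alt lista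
instance (lista : List Int) (out : Bool) : Decidable (Spec_propagar_al_vecino lista out) := by unfold Spec_propagar_al_vecino; infer_instance

-- ===== CLAIM (what is proved, stated in full; the proofs are below) =====
def Claim_equal_propagar_al_vecino : Prop := ∀ (lista : List Int), Dom_propagar_al_vecino lista → Spec_propagar_al_vecino lista (propagar_al_vecino lista)

-- ===== LEMMAS AND PROOFS =====

-- the condition under which A's loop body fires (on the current list l) at index i
def pvC (N : Nat) (l : List Int) (i : Nat) : Prop :=
  (l.getD i 0 = 1 ∧ i < N - 1 ∧ l.getD (i + 1) 0 = 0) ∨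
  (l.getD i 0 = 1 ∧ 0 < i ∧ l.getD (i - 1) 0 = 0)

theorem pvStepA1_false {N : Nat} {st : List Int × Bool} {i : Nat}
    (h : (pvStepA1 N st i).2 = false) :
    pvStepA1 N st i = st ∧ ¬ (st.1.getD i 0 = 1 ∧ i < N - 1 ∧ st.1.getD (i + 1) 0 = 0) := by
  unfold pvStepA1 at *
  split_ifs at h ⊢ with h1
  all_goals simp_all

theorem pvStepA2_false {e : Int} {st : List Int × Bool} {i : Nat}
    (h : (pvStepA2 e st i).2 = false) :
    pvStepA2 e st i = st ∧ ¬ (e = 1 ∧ 0 < i ∧ st.1.getD (i - 1) 0 = 0) := by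
  unfold pvStepA2 at *
  split_ifs at h ⊢ with h1
  all_goals simp_all

theorem pvStepA_false {N : Nat} {st : List Int × Bool} {i : Nat}
    (h : (pvStepA N st i).2 = false) :
    pvStepA N st i = st ∧ ¬ pvC N st.1 i := by
  unfold pvStepA at *
  obtain ⟨h2eq, h2c⟩ := pvStepA2_false h
  rw [h2eq] at h ⊢
  obtain ⟨h1eq, h1c⟩ := pvStepA1_false h
  rw [h1eq] at h2eq h2c ⊢
  exact ⟨rfl, fun hC => hC.elim h1c h2c⟩

theorem pvStepA_nofire {N : Nat} {st : List Int × Bool} {i : Nat}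
    (h : ¬ pvC N st.1 i) : pvStepA N st i = st := by
  unfold pvStepA pvStepA1 pvStepA2
  simp only [pvC, not_or, not_and] at h
  split_ifs with h1 h2 h2 <;> simp_all

theorem loopA_false {N : Nat} :
    ∀ (n : Nat) (st : List Int × Bool),
      ((List.range n).foldl (pvStepA N) st).2 = false →
      (List.range n).foldl (pvStepA N) st = st ∧ ∀ i < n, ¬ pvC N st.1 i := by
  intro n
  induction n with
  | zero => intro st h; simp
  | succ n ih =>
    intro st h
    rw [List.range_succ, List.foldl_append] at h ⊢
    simp only [List.foldl_cons, List.foldl_nil] at h ⊢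
    obtain ⟨heq, hC⟩ := pvStepA_false h
    have hF2 : ((List.range n).foldl (pvStepA N) st).2 = false := by rw [heq] at h; exact h
    obtain ⟨heq2, hC2⟩ := ih st hF2
    rw [heq2] at hC heq
    refine ⟨by rw [heq2]; exact heq, ?_⟩
    intro i hi
    rcases Nat.lt_succ_iff_lt_or_eq.mp hi with h' | h'
    · exact hC2 i h'
    · subst h'; exact hC

theorem loopA_nofire {N : Nat} {l : List Int} {m : Bool}
    (h : ∀ i, ¬ pvC N l i) :
    ∀ n, (List.range n).foldl (pvStepA N) (l, m) = (l, m) := by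
  intro n
  induction n with
  | zero => simp
  | succ n ih =>
    rw [List.range_succ, List.foldl_append, ih]
    simpa using pvStepA_nofire (st := (l, m)) (h n)

-- A returns true iff the firing condition holds somewhere
theorem propagarA_iff (l : List Int) :
    propagar_al_vecino l = true ↔ ∃ i < l.length, pvC l.length l i := by
  constructor
  · intro h
    by_contra hno
    push Not at hno
    have : ∀ i, ¬ pvC l.length l i := by
      intro i hC
      rcases lt_or_ge i l.length with hi | hi
      · exact hno i hi hC
      · rcases hC with ⟨h1, _, _⟩ | ⟨h1, _, _⟩ <;>
        · rw [List.getD_eq_default l 0 (by omega : l.length ≤ i)] at h1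
          exact absurd h1 (by norm_num)
    unfold propagar_al_vecino at h
    rw [loopA_nofire this] at h
    simp at h
  · intro ⟨i, hi, hC⟩
    unfold propagar_al_vecino
    by_contra h
    simp only [Bool.not_eq_true] at h
    obtain ⟨heq, hAll⟩ := loopA_false l.length (l, false) h
    exact hAll i hi hC

-- B returns true iff some adjacent pair of the original list is (1,0) or (0,1)
theorem propagarB_iff (l : List Int) :
    propagar_al_vecino_alt l = true ↔
      ∃ j, j + 1 < l.length ∧
        ((l.getD j 0 = 1 ∧ l.getD (j + 1) 0 = 0) ∨ (l.getD j 0 = 0 ∧ l.getD (j + 1) 0 = 1)) := by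
  unfold propagar_al_vecino_alt
  rw [List.any_eq_true]
  constructor
  · rintro ⟨p, hp, hf⟩
    rw [List.mem_iff_getElem] at hp
    obtain ⟨j, hj, hpj⟩ := hp
    have hjlen : j + 1 < l.length := by
      have := hj; rw [List.length_zip, List.length_tail] at this; omega
    refine ⟨j, hjlen, ?_⟩
    have h1 : (l.zip l.tail)[j] = (l[j]'(by omega), l.tail[j]'(by rw [List.length_tail]; omega)) :=
      List.getElem_zip
    have h2 : l.tail[j]'(by rw [List.length_tail]; omega) = l[j + 1]'hjlen := by
      rw [List.getElem_tail]
    rw [h1, h2] at hpj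
    subst hpj
    simp only [Bool.or_eq_true, Bool.and_eq_true, beq_iff_eq] at hf
    rw [List.getD_eq_getElem l 0 (by omega), List.getD_eq_getElem l 0 hjlen]
    exact hf
  · rintro ⟨j, hj, hcase⟩
    have hjl : j < l.length := by omega
    have hjt : j < l.tail.length := by rw [List.length_tail]; omega
    refine ⟨(l[j]'hjl, l.tail[j]'hjt), ?_, ?_⟩
    · rw [List.mem_iff_getElem]
      exact ⟨j, by rw [List.length_zip, List.length_tail]; omega, List.getElem_zip⟩
    · have h2 : l.tail[j]'hjt = l[j + 1]'hj := by rw [List.getElem_tail]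
      rw [List.getD_eq_getElem l 0 hjl, List.getD_eq_getElem l 0 hj] at hcase
      rw [h2]
      simp only [Bool.or_eq_true, Bool.and_eq_true, beq_iff_eq]
      exact hcase

-- the two existence conditions coincide
theorem conds_iff (l : List Int) :
    (∃ i < l.length, pvC l.length l i) ↔
      ∃ j, j + 1 < l.length ∧
        ((l.getD j 0 = 1 ∧ l.getD (j + 1) 0 = 0) ∨ (l.getD j 0 = 0 ∧ l.getD (j + 1) 0 = 1)) := by
  constructor
  · rintro ⟨i, hi, ⟨h1, h2, h3⟩ | ⟨h1, h2, h3⟩⟩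
    · exact ⟨i, by omega, Or.inl ⟨h1, h3⟩⟩
    · refine ⟨i - 1, by omega, Or.inr ⟨h3, ?_⟩⟩
      rwa [Nat.sub_add_cancel h2]
  · rintro ⟨j, hj, ⟨h1, h2⟩ | ⟨h1, h2⟩⟩
    · exact ⟨j, by omega, Or.inl ⟨h1, by omega, h2⟩⟩
    · exact ⟨j + 1, hj, Or.inr ⟨h2, by omega, by simpa using h1⟩⟩

-- ===== VERDICT (by name: the statement is the Claim_ definition above) =====
theorem propagar_al_vecino_spec : Claim_equal_propagar_al_vecino := by
  intro lista _
  unfold Spec_propagar_al_vecino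
  have h := (propagarA_iff lista).trans ((conds_iff lista).trans (propagarB_iff lista).symm)
  cases hA : propagar_al_vecino lista <;> cases hB : propagar_al_vecino_alt lista <;> simp_all
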